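-- pv_equiv track=rewrite | github.com/GitJiYeon/CodingTest | 프로그래머스/0/181864. 문자열 바꿔서 찾기/문자열 바꿔서 찾기.py | solution
-- ===== SOURCE A (Python) =====
-- def solution(myString, pat):
--     reStr = ""
--     for i in range(len(myString)):
--         reStr += "B" if myString[i] == 'A' else "A"
--     if(pat in reStr):
--         return 1
--     else:
--         return 0
-- ===== SOURCE B (Python) =====
-- def solution(myString, pat):
--     n, m = len(myString), len(pat)
--     for i in range(n - m + 1):
--         ok = True
--         for j in range(m):
--             c = myString[i + j]
--             p = pat[j]
--             if not ((p == 'B' and c == 'A') or (p == 'A' and c != 'A')):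
--                 ok = False
--                 break
--         if ok:
--             return 1
--     return 0
-- ===== Notes on version B (the rewrite author's own statement) =====
-- stated objective: faster
-- what changed: B never builds the transformed string: it slides a window over myString and compares pat character-by-character against the A/B swap rule applied on the fly, returning early on the first match.
import Mathlib
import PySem

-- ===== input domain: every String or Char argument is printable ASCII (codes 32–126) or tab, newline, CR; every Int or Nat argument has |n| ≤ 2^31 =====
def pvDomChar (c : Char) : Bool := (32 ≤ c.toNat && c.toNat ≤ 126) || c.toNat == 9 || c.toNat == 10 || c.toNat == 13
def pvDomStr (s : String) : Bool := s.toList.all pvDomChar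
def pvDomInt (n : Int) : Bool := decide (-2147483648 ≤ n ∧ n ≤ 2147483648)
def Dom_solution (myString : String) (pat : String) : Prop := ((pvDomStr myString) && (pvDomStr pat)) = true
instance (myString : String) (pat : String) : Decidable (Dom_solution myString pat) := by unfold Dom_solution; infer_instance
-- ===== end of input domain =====

-- B avoids building the transformed string: it slides a window and applies the swap rule on the fly (constant extra space, early exit).

-- ===== PORT A =====
-- builds reStr by appending the swapped character for each index, then tests 'pat in reStr'
def solution (myString : String) (pat : String) : Int :=
  let s := myString.toList
  let reStr := (List.range s.length).foldl
    (fun acc i => acc ++ [if s.getD i ' ' == 'A' then 'B' else 'A']) ([] : List Char)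
  if PySem.Chars.isIn pat.toList reStr then 1 else 0

-- ===== PORT B =====
-- inner loop 'for j in range(m)' with break: structural recursion on the remaining pattern
def pvMatch (s : List Char) : List Char → Nat → Bool
  | [], _ => true
  | p :: rest, i =>
      let c := s.getD i ' '
      if (p == 'B' && c == 'A') || (p == 'A' && !(c == 'A')) then pvMatch s rest (i + 1)
      else false

-- outer loop 'for i in range(n - m + 1)': recursion on the number of remaining window starts
def pvScan (s : List Char) (pat : List Char) : Nat → Nat → Int
  | _, 0 => 0
  | i, cnt + 1 => if pvMatch s pat i then 1 else pvScan s pat (i + 1) cnt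

def solution_alt (myString : String) (pat : String) : Int :=
  let s := myString.toList
  pvScan s pat.toList 0 (s.length + 1 - pat.toList.length)

-- ===== PRECONDITION & SPEC =====
def Spec_solution (myString : String) (pat : String) (out : Int) : Prop := out = solution_alt myString pat
instance (myString : String) (pat : String) (out : Int) : Decidable (Spec_solution myString pat out) := by unfold Spec_solution; infer_instance

-- ===== CLAIM (what is proved, stated in full; the proofs are below) =====
def Claim_equal_solution : Prop := ∀ (myString : String) (pat : String), Dom_solution myString pat → Spec_solution myString pat (solution myString pat)

-- ===== LEMMAS AND PROOFS =====

-- the swap rule as a function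
def pvSwap (c : Char) : Char := if c == 'A' then 'B' else 'A'

theorem pvBuild_eq_map (s : List Char) (n : Nat) (hn : n ≤ s.length) (acc : List Char) :
    (List.range n).foldl (fun acc i => acc ++ [if s.getD i ' ' == 'A' then 'B' else 'A']) acc
      = acc ++ (s.take n).map pvSwap := by
  induction n generalizing acc with
  | zero => simp
  | succ k ih =>
      rw [List.range_succ, List.foldl_append, ih (by omega)]
      simp only [List.foldl_cons, List.foldl_nil]
      have hk : k < s.length := by omega
      have hg : s.getD k ' ' = s[k] := by
        rw [List.getD_eq_getElem?_getD, List.getElem?_eq_getElem hk]; rfl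
      have ht : List.take (k + 1) s = List.take k s ++ [s[k]] := by
        rw [List.take_add_one, List.getElem?_eq_getElem hk]; rfl
      rw [ht, List.map_append, hg]
      simp [pvSwap]

theorem pvRule_iff (p c : Char) :
    ((p == 'B' && c == 'A') || (p == 'A' && !(c == 'A'))) = true ↔ p = pvSwap c := by
  by_cases h : c = 'A' <;> simp [pvSwap, h]

theorem pvMatch_iff (s : List Char) (pat : List Char) (i : Nat)
    (h : i + pat.length ≤ s.length) :
    pvMatch s pat i = true ↔ pat <+: (s.map pvSwap).drop i := by
  induction pat generalizing i with
  | nil => simp [pvMatch]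
  | cons p rest ih =>
      have hi : i < s.length := by simp at h; omega
      have hdrop : (s.map pvSwap).drop i = pvSwap s[i] :: (s.map pvSwap).drop (i + 1) := by
        rw [List.drop_eq_getElem_cons (by simpa using hi)]
        simp
      have hg : s.getD i ' ' = s[i] := by
        rw [List.getD_eq_getElem?_getD, List.getElem?_eq_getElem hi]; rfl
      have hrule : ((p == 'B' && s.getD i ' ' == 'A') || (p == 'A' && !(s.getD i ' ' == 'A'))) = true
          ↔ p = pvSwap s[i] := by rw [hg]; exact pvRule_iff _ _
      rw [pvMatch, hdrop, List.cons_prefix_cons]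
      by_cases hp : p = pvSwap s[i]
      · rw [if_pos (hrule.mpr hp), ih (i + 1) (by simp at h ⊢; omega)]
        simp [hp]
      · rw [if_neg (fun hc => hp (hrule.mp hc))]
        simp [hp]

theorem pvScan_eq_one_iff (s pat : List Char) (cnt i : Nat) :
    pvScan s pat i cnt = 1 ↔ ∃ k < cnt, pvMatch s pat (i + k) = true := by
  induction cnt generalizing i with
  | zero => simp [pvScan]
  | succ c ih =>
      rw [pvScan]
      by_cases hm : pvMatch s pat i = true
      · rw [if_pos hm]
        exact ⟨fun _ => ⟨0, by omega, by simpa using hm⟩, fun _ => rfl⟩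
      · rw [if_neg hm, ih]
        constructor
        · rintro ⟨k, hk, hmk⟩
          exact ⟨k + 1, by omega, by rwa [show i + 1 + k = i + (k + 1) by omega] at hmk⟩
        · rintro ⟨k, hk, hmk⟩
          match k with
          | 0 => exact absurd (by simpa using hmk) hm
          | k + 1 => exact ⟨k, by omega, by rwa [show i + (k + 1) = i + 1 + k by omega] at hmk⟩

theorem pvScan_zero_or_one (s pat : List Char) (cnt i : Nat) :
    pvScan s pat i cnt = 0 ∨ pvScan s pat i cnt = 1 := by
  induction cnt generalizing i with
  | zero => left; rfl
  | succ c ih =>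
      rw [pvScan]
      by_cases hm : pvMatch s pat i = true
      · right; rw [if_pos hm]
      · rw [if_neg hm]; exact ih (i + 1)

theorem pvIsIn_iff_window (s pat : List Char) :
    PySem.Chars.isIn pat (s.map pvSwap) = true
      ↔ ∃ i, i + pat.length ≤ s.length ∧ pat <+: (s.map pvSwap).drop i := by
  rw [← PySem.Chars.exists_prefix_drop_iff_isIn]
  constructor
  · rintro ⟨j, hj⟩
    by_cases hle : j + pat.length ≤ s.length
    · exact ⟨j, hle, hj⟩
    · have hlen := hj.length_le
      simp only [List.length_drop, List.length_map] at hlen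
      have hm0 : pat.length = 0 := by omega
      exact ⟨0, by omega, by simp [List.eq_nil_of_length_eq_zero hm0]⟩
  · rintro ⟨i, _, hi⟩; exact ⟨i, hi⟩

-- ===== VERDICT (by name: the statement is the Claim_ definition above) =====
theorem solution_spec : Claim_equal_solution := by
  intro myString pat _
  simp only [Spec_solution, solution, solution_alt]
  set s := myString.toList
  set ps := pat.toList
  rw [pvBuild_eq_map s s.length le_rfl [], List.take_length, List.nil_append]
  by_cases hin : PySem.Chars.isIn ps (s.map pvSwap) = true
  · rw [if_pos hin]
    rcases (pvIsIn_iff_window s ps).mp hin with ⟨i, hle, hpre⟩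
    have hm : pvMatch s ps i = true := (pvMatch_iff s ps i hle).mpr hpre
    exact ((pvScan_eq_one_iff s ps (s.length + 1 - ps.length) 0).mpr
      ⟨i, by omega, by simpa using hm⟩).symm
  · rw [if_neg hin]
    rcases pvScan_zero_or_one s ps (s.length + 1 - ps.length) 0 with h0 | h1
    · exact h0.symm
    · exfalso
      rcases (pvScan_eq_one_iff s ps (s.length + 1 - ps.length) 0).mp h1 with ⟨k, hk, hmk⟩
      have hle : k + ps.length ≤ s.length := by omega
      exact hin ((pvIsIn_iff_window s ps).mpr
        ⟨k, hle, (pvMatch_iff s ps k (by omega)).mp (by simpa using hmk)⟩)
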